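-- pv_equiv track=rewrite | github.com/PaulRaatschen/Plan-Merging-Project-Sauerbrei-Raatschen | solvers/permutation_tools.py | index_to_perm
-- ===== SOURCE A (Python) =====
-- from math import factorial
-- from typing import Union, List
--
-- def index_to_perm(index : int,size : int) -> List[int]:
--     """
--     Converts an index 1..n!-1 back to the corresponding permutation p(1..n).
--
--     Args:
--         index : Index of the permutation.
--         size : Length of the permutation.
--
--     Returns:
--         List with permutation of numbers 1..n corresponding to index.
--     """
--     perm : List[int] = [0] * size
--     nums : List[int] = list(range(1,size+1))
--     for i in range(size):
--         size -= 1
--         fac : int = factorial(size)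
--         num : int = index // fac
--         perm[i] = nums[num]
--         del nums[num]
--         index = index % fac
--
--     return perm
-- ===== SOURCE B (Python) =====
-- def index_to_perm(index: int, size: int):
--     # Extract factorial-base digits right-to-left with a single divmod chain,
--     # then decode back-to-front: prepend d+1 and shift up existing values >= it.
--     digits = []
--     for r in range(1, size + 1):
--         index, d = divmod(index, r)
--         digits.append(d)
--     perm = []
--     for d in digits:
--         x = d + 1
--         perm = [x] + [v + 1 if v >= x else v for v in perm]
--     return perm
-- ===== Notes on version B (the rewrite author's own statement) =====
-- stated objective: alternative
-- what changed: A recomputes a factorial and divides the index by it (huge big-int operands) and deletes from a shrinking candidate list at every step; B extracts all factorial-base digits with one divmod chain over the small radices 1..size and then decodes them back-to-front, prepending d+1 and shifting up the already-placed values, so no factorial computations or big-int divisions remain.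
import Mathlib
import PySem

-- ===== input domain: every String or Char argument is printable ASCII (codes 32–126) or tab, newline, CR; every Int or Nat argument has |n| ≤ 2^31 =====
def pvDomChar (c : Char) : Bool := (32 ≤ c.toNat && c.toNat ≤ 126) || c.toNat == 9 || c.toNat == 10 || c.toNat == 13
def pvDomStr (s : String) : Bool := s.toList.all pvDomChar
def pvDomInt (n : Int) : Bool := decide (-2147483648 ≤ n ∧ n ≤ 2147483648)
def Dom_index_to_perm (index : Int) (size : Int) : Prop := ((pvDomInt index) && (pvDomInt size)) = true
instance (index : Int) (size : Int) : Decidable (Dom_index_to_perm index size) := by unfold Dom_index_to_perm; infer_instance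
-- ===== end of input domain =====

-- B replaces A's per-step factorial + list deletion by a single divmod chain (factorial-base digits,
-- low radix first) followed by a back-to-front Lehmer decode; alternative decomposition, same result.

-- ===== PORT A =====
-- math.factorial; A only reaches it with a nonnegative argument
def facI (n : Int) : Int := (Nat.factorial n.toNat : Int)

-- A's for-loop; fuel = iterations left, i = the loop variable. `perm[i] = nums[num]; del nums[num]`
-- is ported as pop? (reads and removes the element at the same, possibly negative, index;
-- none = Python's IndexError).
def aLoop : Nat → Nat → List Int → List Int → Int → Int →
    Option (List Int × List Int × Int × Int)
  | 0, _, perm, nums, index, sz => some (perm, nums, index, sz)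
  | k+1, i, perm, nums, index, sz =>
      let sz' := sz - 1
      let fac := facI sz'
      let num := PySem.Int.floordiv index fac
      match PySem.List.pop? nums num with
      | some (v, rest) =>
          aLoop k (i+1) (PySem.List.pySetD perm (i : Int) v) rest (PySem.Int.mod index fac) sz'
      | none => none

def index_to_perm (index : Int) (size : Int) : List Int :=
  match aLoop size.toNat 0 (List.replicate size.toNat 0)
      (PySem.List.pyRange 1 (size + 1) 1) index size with
  | some (p, _, _, _) => p
  | none => []   -- Python raises IndexError here; excluded by Pre_

-- ===== PORT B =====
-- B's first loop: index, d = divmod(index, r) for r = 1..size, collecting the digits d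
def bDigits : Int → Int → Nat → List Int
  | _, _, 0 => []
  | idx, r, k+1 => PySem.Int.mod idx r :: bDigits (PySem.Int.floordiv idx r) (r + 1) k

-- B's second loop body: perm = [d+1] + [v+1 if v >= d+1 else v for v in perm]
def bInsert (perm : List Int) (d : Int) : List Int :=
  (d + 1) :: perm.map (fun v => if d + 1 ≤ v then v + 1 else v)

def index_to_perm_alt (index : Int) (size : Int) : List Int :=
  (bDigits index 1 size.toNat).foldl bInsert []

-- ===== PRECONDITION & SPEC =====
-- Pre_ is exactly the set of inputs on which A returns normally: for size ≥ 1 A raises IndexError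
-- unless -size! ≤ index < size! (negative indices wrap Python-style, down to -size!); for
-- size ≤ 0 A always returns []. No input on which A returns a value is excluded: the 'min' with
-- the log2-based bound is only an evaluation device — factorial k already exceeds |index| at
-- k = log2 |index| + 2 and factorial is monotone, so the capped condition is provably EQUAL to
-- 'size ≤ 0 ∨ -size! ≤ index < size!' (lemma Pre_iff_factorial_bound below).
def Pre_index_to_perm (index : Int) (size : Int) : Prop :=
  size ≤ 0 ∨ (-(Nat.factorial (min size.toNat (index.natAbs.log2 + 2)) : Int) ≤ index ∧
    index < (Nat.factorial (min size.toNat (index.natAbs.log2 + 2)) : Int))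
instance (index : Int) (size : Int) : Decidable (Pre_index_to_perm index size) := by
  unfold Pre_index_to_perm; infer_instance

def pvWitness_index_to_perm : Int × Int := (3, 3)

def Spec_index_to_perm (index : Int) (size : Int) (out : List Int) : Prop :=
  out = index_to_perm_alt index size
instance (index : Int) (size : Int) (out : List Int) : Decidable (Spec_index_to_perm index size out) := by
  unfold Spec_index_to_perm; infer_instance

-- ===== CLAIM (what is proved, stated in full; the proofs are below) =====
def Claim_equal_index_to_perm : Prop := ∀ (index : Int) (size : Int),
  Dom_index_to_perm index size → Pre_index_to_perm index size →
  Spec_index_to_perm index size (index_to_perm index size)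

-- ===== LEMMAS AND PROOFS =====

-- 2^k ≤ (k+1)!
theorem two_pow_le_factorial_succ : ∀ (k : Nat), 2 ^ k ≤ Nat.factorial (k+1) := by
  intro k
  induction k with
  | zero => simp [Nat.factorial]
  | succ k ih =>
      have h1 : 2 ^ (k+1) = 2 * 2 ^ k := by ring
      have h2 : Nat.factorial (k+2) = (k+2) * Nat.factorial (k+1) := rfl
      rw [h1, h2]
      exact Nat.mul_le_mul (by omega) ih
-- the cap in Pre_ changes nothing: Pre_ is equal to the plain factorial bound
theorem Pre_iff_factorial_bound (index : Int) (size : Int) :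
    Pre_index_to_perm index size ↔
      (size ≤ 0 ∨ (-(Nat.factorial size.toNat : Int) ≤ index ∧
        index < (Nat.factorial size.toNat : Int))) := by
  unfold Pre_index_to_perm
  set c : Nat := index.natAbs.log2 + 2 with hc
  by_cases h : size.toNat ≤ c
  · rw [min_eq_left h]
  · have hcn : c ≤ size.toNat := by omega
    rw [min_eq_right hcn]
    have hx : index.natAbs < Nat.factorial c := by
      calc index.natAbs < 2 ^ (index.natAbs.log2 + 1) := Nat.lt_log2_self
        _ ≤ Nat.factorial (index.natAbs.log2 + 2) := two_pow_le_factorial_succ _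
    have hx' : (index.natAbs : Int) < (Nat.factorial c : Int) := by exact_mod_cast hx
    have hmono : (Nat.factorial c : Int) ≤ (Nat.factorial size.toNat : Int) := by
      exact_mod_cast Nat.factorial_le hcn
    constructor
    · intro _; right; omega
    · intro _; right; omega

-- [1..k], the value A's nums list starts from
def cano (k : Nat) : List Int := (List.range k).map (fun (t : Nat) => (t : Int) + 1)

-- deleting position j from [1..k+1] shifts the values above j up by one
def shiftF (j : Nat) (v : Int) : Int := if (j : Int) + 1 ≤ v then v + 1 else v

-- sequential writes perm[i], perm[i+1], … (what A's `perm[i] = …` does across iterations)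
def setSeq : List Int → Nat → List Int → List Int
  | perm, _, [] => perm
  | perm, i, v :: vs => setSeq (perm.set i v) (i+1) vs

-- r * (r+1) * … * (r+k-1): the product of the radices B divides by
def prodR : Int → Nat → Int
  | _, 0 => 1
  | r, k+1 => r * prodR (r+1) k

theorem prodR_pos : ∀ (k : Nat) (r : Int), 1 ≤ r → 0 < prodR r k := by
  intro k
  induction k with
  | zero => intro r _; simp [prodR]
  | succ k ih =>
      intro r hr
      have h1 := ih (r+1) (by omega)
      have h2 : (0:Int) < r := by omega
      simpa [prodR] using mul_pos h2 h1

theorem prodR_succ_right : ∀ (k : Nat) (r : Int), prodR r (k+1) = prodR r k * (r + k) := by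
  intro k
  induction k with
  | zero => intro r; simp [prodR]
  | succ k ih =>
      intro r
      rw [show prodR r (k+1+1) = r * prodR (r+1) (k+1) from rfl, ih (r+1),
        show prodR r (k+1) = r * prodR (r+1) k from rfl]
      push_cast
      ring

theorem prodR_one_fact : ∀ (k : Nat), prodR 1 k = (Nat.factorial k : Int) := by
  intro k
  induction k with
  | zero => simp [prodR, Nat.factorial]
  | succ k ih =>
      rw [prodR_succ_right, ih, Nat.factorial_succ]
      push_cast
      ring

theorem emod_mul_ediv (a b c : Int) (hb : 0 < b) : (a % (b*c)) / b = (a / b) % c := by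
  have h1 : b * c * (a / (b*c)) + a % (b*c) = a := Int.mul_ediv_add_emod a (b*c)
  have h2 : (a / b) / c = a / (b*c) := Int.ediv_ediv_of_nonneg (le_of_lt hb)
  have h3 : a % (b*c) = a - (a / b / c) * (b * c) := by rw [h2]; linear_combination h1
  have h4 : a - a / b / c * (b * c) = a - (a / b / c * c) * b := by ring
  rw [h3, h4, Int.sub_mul_ediv_right _ _ (ne_of_gt hb)]
  have h5 : c * (a / b / c) + (a / b) % c = a / b := Int.mul_ediv_add_emod (a/b) c
  linear_combination -h5

theorem fdiv_fdiv_pos (a b c : Int) (hb : 0 < b) (hc : 0 < c) :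
    PySem.Int.floordiv (PySem.Int.floordiv a b) c = PySem.Int.floordiv a (b * c) := by
  rw [PySem.Int.floordiv_eq_ediv_of_pos hb, PySem.Int.floordiv_eq_ediv_of_pos hc,
    PySem.Int.floordiv_eq_ediv_of_pos (mul_pos hb hc)]
  exact Int.ediv_ediv_of_nonneg (le_of_lt hb)

-- the digit B extracts at radix r+k is the mixed-radix digit of weight prodR r k
theorem bDigits_snoc : ∀ (k : Nat) (r : Int) (idx : Int), 1 ≤ r →
    bDigits idx r (k+1) = bDigits idx r k ++
      [PySem.Int.mod (PySem.Int.floordiv idx (prodR r k)) (r + k)] := by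
  intro k
  induction k with
  | zero =>
      intro r idx _
      show PySem.Int.mod idx r :: bDigits _ _ 0
        = [] ++ [PySem.Int.mod (PySem.Int.floordiv idx 1) (r + (0:Nat))]
      simp [bDigits, PySem.Int.floordiv, Int.fdiv_one]
  | succ k ih =>
      intro r idx hr
      show PySem.Int.mod idx r :: bDigits (PySem.Int.floordiv idx r) (r + 1) (k+1) = _
      rw [ih (r+1) (PySem.Int.floordiv idx r) (by omega)]
      show PySem.Int.mod idx r :: (bDigits (PySem.Int.floordiv idx r) (r+1) k ++ _) =
        (PySem.Int.mod idx r :: bDigits (PySem.Int.floordiv idx r) (r+1) k) ++ _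
      rw [List.cons_append]
      have hr' : (0:Int) < r := by omega
      have hP : (0:Int) < prodR (r+1) k := prodR_pos k (r+1) (by omega)
      rw [fdiv_fdiv_pos idx r (prodR (r+1) k) hr' hP]
      have h1 : r * prodR (r+1) k = prodR r (k+1) := rfl
      rw [h1]
      have h2 : (r+1) + (k : Int) = r + ((k+1 : Nat) : Int) := by push_cast; ring
      rw [h2]

-- the k digits at radices r..r+k-1 depend on idx only modulo prodR r k
theorem bDigits_mod : ∀ (k : Nat) (r : Int) (idx : Int), 1 ≤ r →
    bDigits (PySem.Int.mod idx (prodR r k)) r k = bDigits idx r k := by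
  intro k
  induction k with
  | zero => intro r idx _; simp [bDigits]
  | succ k ih =>
      intro r idx hr
      have hr' : (0:Int) < r := by omega
      have hQ : (0:Int) < prodR (r+1) k := prodR_pos k (r+1) (by omega)
      have hprod : prodR r (k+1) = r * prodR (r+1) k := rfl
      show PySem.Int.mod (PySem.Int.mod idx (prodR r (k+1))) r ::
          bDigits (PySem.Int.floordiv (PySem.Int.mod idx (prodR r (k+1))) r) (r+1) k =
        PySem.Int.mod idx r :: bDigits (PySem.Int.floordiv idx r) (r+1) k
      have hhead : PySem.Int.mod (PySem.Int.mod idx (prodR r (k+1))) r = PySem.Int.mod idx r := by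
        rw [hprod, PySem.Int.mod_eq_emod_of_pos hr', PySem.Int.mod_eq_emod_of_pos hr',
          PySem.Int.mod_eq_emod_of_pos (mul_pos hr' hQ)]
        exact Int.emod_emod_of_dvd idx ⟨prodR (r+1) k, rfl⟩
      have htail : PySem.Int.floordiv (PySem.Int.mod idx (prodR r (k+1))) r
          = PySem.Int.mod (PySem.Int.floordiv idx r) (prodR (r+1) k) := by
        rw [hprod, PySem.Int.mod_eq_emod_of_pos (mul_pos hr' hQ),
          PySem.Int.floordiv_eq_ediv_of_pos hr', PySem.Int.floordiv_eq_ediv_of_pos hr',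
          PySem.Int.mod_eq_emod_of_pos hQ]
        exact emod_mul_ediv idx r (prodR (r+1) k) hr'
      rw [hhead, htail, ih (r+1) (PySem.Int.floordiv idx r) (by omega)]

theorem length_bDigits : ∀ (k : Nat) (r : Int) (idx : Int), (bDigits idx r k).length = k := by
  intro k
  induction k with
  | zero => intro r idx; simp [bDigits]
  | succ k ih =>
      intro r idx
      show (PySem.Int.mod idx r :: bDigits (PySem.Int.floordiv idx r) (r+1) k).length = k+1
      rw [List.length_cons, ih (r+1)]

theorem length_foldl_bInsert : ∀ (ds acc : List Int),
    (ds.foldl bInsert acc).length = acc.length + ds.length := by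
  intro ds
  induction ds with
  | nil => intro acc; simp
  | cons d ds ih => intro acc; simp [ih, bInsert]; omega

theorem length_cano (k : Nat) : (cano k).length = k := by simp [cano]

theorem cano_getElem (m t : Nat) (h : t < m) :
    (cano m)[t]'(by simpa [length_cano] using h) = (t : Int) + 1 := by
  unfold cano
  rw [List.getElem_map, List.getElem_range]

theorem cano_eraseIdx (k j : Nat) (hj : j ≤ k) :
    (cano (k+1)).eraseIdx j = (cano k).map (shiftF j) := by
  apply List.ext_getElem
  · simp [length_cano, List.length_eraseIdx]
    omega
  · intro t h1 h2
    have ht : t < k := by simpa [length_cano] using h2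
    rw [List.getElem_eraseIdx, List.getElem_map]
    by_cases hc : t < j
    · rw [dif_pos hc, cano_getElem (k+1) t (by omega), cano_getElem k t ht]
      simp only [shiftF]
      rw [if_neg (by omega : ¬ ((j:Int) + 1 ≤ (t:Int) + 1))]
    · rw [dif_neg hc, cano_getElem (k+1) (t+1) (by omega), cano_getElem k t ht]
      simp only [shiftF]
      rw [if_pos (by omega : (j:Int) + 1 ≤ (t:Int) + 1)]
      push_cast
      ring

theorem setSeq_eq : ∀ (vs perm : List Int) (i : Nat), i + vs.length = perm.length →
    setSeq perm i vs = perm.take i ++ vs := by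
  intro vs
  induction vs with
  | nil =>
      intro perm i h
      simp at h
      simp [setSeq, List.take_of_length_le (le_of_eq h.symm)]
  | cons v vs ih =>
      intro perm i h
      have hi : i < perm.length := by simp at h; omega
      rw [setSeq, ih (perm.set i v) (i+1) (by simp at h ⊢; omega)]
      have h1 : (perm.set i v).take (i+1) = perm.take i ++ [v] := by
        rw [List.take_add_one, List.take_set]
        rw [List.set_eq_of_length_le (by simp)]
        have : (perm.set i v)[i]? = some v := by simp [hi]
        rw [this]
        rfl
      rw [h1]
      simp

-- MAIN LEMMA: on nums = the f-image of [1..k], with fuel k, size counter k and -k! ≤ idx < k!,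
-- A's loop writes exactly the f-image of B's decoded digit list into perm at positions i, i+1, …
theorem aLoop_eq : ∀ (k : Nat) (f : Int → Int) (i : Nat) (perm : List Int) (idx : Int),
    -(Nat.factorial k : Int) ≤ idx → idx < (Nat.factorial k : Int) →
    ∃ rest, aLoop k i perm ((cano k).map f) idx (k : Int)
      = some (setSeq perm i (((bDigits idx 1 k).foldl bInsert []).map f), rest) := by
  intro k
  induction k with
  | zero =>
      intro f i perm idx h1 h2
      exact ⟨((cano 0).map f, idx, (0:Int)), by simp [aLoop, bDigits, setSeq]⟩
  | succ k ih =>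
      intro f i perm idx h1 h2
      have hFpos : (0:Int) < (Nat.factorial k : Int) := by exact_mod_cast Nat.factorial_pos k
      have hfs : ((Nat.factorial (k+1) : Nat) : Int) = ((k:Int)+1) * (Nat.factorial k : Int) := by
        rw [Nat.factorial_succ]; push_cast; ring
      set F : Int := (Nat.factorial k : Int) with hF
      set q : Int := PySem.Int.floordiv idx F with hq
      have hql : -((k:Int)+1) ≤ q := by
        rw [hq, PySem.Int.le_floordiv_iff_mul_le hFpos]
        rw [hfs] at h1
        linarith
      have hqu : q < (k:Int)+1 := by
        rw [hq, PySem.Int.floordiv_lt_iff_lt_mul hFpos]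
        rw [hfs] at h2
        linarith
      obtain ⟨j, hjk, hjq, hpyidx⟩ :
          ∃ j : Nat, j ≤ k ∧ ((j:Int) = PySem.Int.mod q ((k:Int)+1)) ∧
            PySem.List.pyIdx? (k+1) q = some j := by
        have hk1 : (0:Int) < (k:Int)+1 := by positivity
        by_cases hq0 : 0 ≤ q
        · refine ⟨q.toNat, by omega, ?_, ?_⟩
          · rw [PySem.Int.mod_eq_emod_of_pos hk1, Int.emod_eq_of_lt hq0 hqu]
            omega
          · simp only [PySem.List.pyIdx?, if_pos hq0]
            rw [if_pos (by push_cast; omega)]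
        · refine ⟨(k+1) - (-q).toNat, by omega, ?_, ?_⟩
          · rw [PySem.Int.mod_eq_emod_of_pos hk1]
            have : q % ((k:Int)+1) = (q + ((k:Int)+1) * 1) % ((k:Int)+1) := by
              rw [Int.add_mul_emod_self_left]
            rw [this, mul_one, Int.emod_eq_of_lt (by omega) (by omega)]
            omega
          · simp only [PySem.List.pyIdx?, if_neg hq0]
            rw [if_pos (by push_cast; omega)]
      -- the pop? step: reads f (j+1) and leaves the f∘shift image of [1..k]
      have hlen : (((cano (k+1)).map f)).length = k + 1 := by simp [length_cano]
      have hget : ((cano (k+1)).map f)[j]? = some (f ((j:Int)+1)) := by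
        rw [List.getElem?_eq_getElem (by simp [length_cano]; omega), List.getElem_map,
          cano_getElem (k+1) j (by omega)]
      have hpop : PySem.List.pop? ((cano (k+1)).map f) q
          = some (f ((j:Int)+1), (cano k).map (f ∘ shiftF j)) := by
        simp only [PySem.List.pop?, hlen, hpyidx, Option.bind_some, hget, Option.map_some]
        rw [List.eraseIdx_map, cano_eraseIdx k j hjk, List.map_map]
      -- the recursive call's arguments
      have hsz : ((k+1 : Nat) : Int) - 1 = ((k : Nat) : Int) := by push_cast; ring
      have hfac : facI ((k : Nat) : Int) = F := by simp [facI, hF]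
      have hmodb : 0 ≤ PySem.Int.mod idx F ∧ PySem.Int.mod idx F < F :=
        ⟨PySem.Int.mod_nonneg idx hFpos, PySem.Int.mod_lt idx hFpos⟩
      obtain ⟨rest, hrest⟩ := ih (f ∘ shiftF j) (i+1) (perm.set i (f ((j:Int)+1)))
        (PySem.Int.mod idx F) (by omega) hmodb.2
      refine ⟨rest, ?_⟩
      show aLoop (k+1) i perm ((cano (k+1)).map f) idx ((k+1 : Nat) : Int) = _
      rw [aLoop]
      simp only [hsz, hfac, ← hq, hpop, PySem.List.pySetD_natCast]
      -- rewrite B's digit list: top digit is j, lower digits only see idx mod k!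
      have hd : bDigits idx 1 (k+1) = bDigits (PySem.Int.mod idx F) 1 k ++ [(j:Int)] := by
        rw [bDigits_snoc k 1 idx (le_refl 1), prodR_one_fact, ← hF, ← hq]
        have hc1 : (1:Int) + (k:Int) = (k:Int)+1 := by ring
        rw [hc1, ← hjq]
        have hmm : bDigits (PySem.Int.mod idx F) 1 k = bDigits idx 1 k := by
          have hFp : F = prodR 1 k := by rw [prodR_one_fact]
          rw [hFp]
          exact bDigits_mod k 1 idx (le_refl 1)
        rw [hmm]
      rw [hd, List.foldl_append, List.foldl_cons, List.foldl_nil]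
      show _ = some (setSeq perm i ((((j:Int)+1) ::
        ((bDigits (PySem.Int.mod idx F) 1 k).foldl bInsert []).map
          (fun v => if (j:Int) + 1 ≤ v then v + 1 else v)).map f), rest)
      rw [List.map_cons, List.map_map, setSeq]
      exact hrest

-- ===== VERDICT (by name: the statements are the Claim_ definitions above) =====
theorem index_to_perm_spec : Claim_equal_index_to_perm := by
  intro index size _ hpre
  unfold Spec_index_to_perm index_to_perm index_to_perm_alt
  by_cases hs : size ≤ 0
  · rw [Int.toNat_of_nonpos hs]
    simp [aLoop, bDigits]
  · have hpos : 0 < size := by omega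
    obtain ⟨n, rfl⟩ : ∃ n : Nat, size = (n : Int) :=
      ⟨size.toNat, (Int.toNat_of_nonneg (le_of_lt hpos)).symm⟩
    simp only [Int.toNat_natCast] at *
    have hb : -(Nat.factorial n : Int) ≤ index ∧ index < (Nat.factorial n : Int) := by
      rcases (Pre_iff_factorial_bound index (n:Int)).mp hpre with h | h
      · exact absurd h hs
      · simpa using h
    obtain ⟨rest, hrest⟩ := aLoop_eq n id 0 (List.replicate n 0) index hb.1 hb.2
    have hnums : PySem.List.pyRange 1 ((n:Int) + 1) 1 = (cano n).map id := by
      rw [List.map_id]; unfold cano; rw [PySem.List.pyRange_one]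
      have h1 : ((n:Int) + 1 - 1).toNat = n := by omega
      rw [h1]
      exact List.map_congr_left (fun t _ => by ring)
    rw [hnums, hrest, List.map_id]
    rw [setSeq_eq _ _ 0 (by simp [length_foldl_bInsert, length_bDigits])]
    simp
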